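-- pv_equiv track=rewrite | github.com/prashusat/Sentiment-Analysis | machinelearning.py | count_word_given_class
-- ===== SOURCE A (Python) =====
-- vector_of_labels=[]
--
-- def count_word_given_class(vectorized_matrix,vector_of_labels):
--  #   number_of_occurences_given_positive=[0 for i in range(len(vector_of_words))]
--  #   number_of_occurences_given_negative=[0 for i in range(len(vector_of_words))]
--     data_with_positive_label=[vectorized_matrix[i] for i in range(len(vector_of_labels)) if vector_of_labels[i]==1]
--     data_with_negative_label=[vectorized_matrix[i] for i in range(len(vector_of_labels)) if vector_of_labels[i]==0]
--     #https://stackoverflow.com/questions/14050824/add-sum-of-values-of-two-lists-into-new-list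
--     #use to add all lists inside a list element-wise
--     number_of_word_occurences_given_positive=[sum(x) for x in zip(*data_with_positive_label)]
--     number_of_word_occurences_given_negative=[sum(x) for x in zip(*data_with_negative_label)]
--     m=n=0
--     for i in number_of_word_occurences_given_positive:
--         if i!=0:
--             m+=i
--     for i in number_of_word_occurences_given_negative:
--         if i!=0:
--             n+=i
--     # m is number of tokens in positive class
--     # n is number of tokens in negative class
--     return number_of_word_occurences_given_positive,number_of_word_occurences_given_negative,m,n
-- ===== SOURCE B (Python) =====
-- def count_word_given_class(vectorized_matrix, vector_of_labels):
--     pos = neg = None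
--     for row, lab in zip(vectorized_matrix, vector_of_labels):
--         if lab == 1:
--             pos = list(row) if pos is None else [a + b for a, b in zip(pos, row)]
--         elif lab == 0:
--             neg = list(row) if neg is None else [a + b for a, b in zip(neg, row)]
--     pos = [] if pos is None else pos
--     neg = [] if neg is None else neg
--     return pos, neg, sum(pos), sum(neg)
-- ===== Notes on version B (the rewrite author's own statement) =====
-- stated objective: alternative
-- what changed: Replaces A's index-based row selection into two intermediate lists plus zip(*)-transposition and two extra filtered-summation loops by a single pass over zip(matrix, labels) that element-wise accumulates each row into a lazily-initialized positive or negative running vector and finally sums the vectors for the token totals.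
import Mathlib
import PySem

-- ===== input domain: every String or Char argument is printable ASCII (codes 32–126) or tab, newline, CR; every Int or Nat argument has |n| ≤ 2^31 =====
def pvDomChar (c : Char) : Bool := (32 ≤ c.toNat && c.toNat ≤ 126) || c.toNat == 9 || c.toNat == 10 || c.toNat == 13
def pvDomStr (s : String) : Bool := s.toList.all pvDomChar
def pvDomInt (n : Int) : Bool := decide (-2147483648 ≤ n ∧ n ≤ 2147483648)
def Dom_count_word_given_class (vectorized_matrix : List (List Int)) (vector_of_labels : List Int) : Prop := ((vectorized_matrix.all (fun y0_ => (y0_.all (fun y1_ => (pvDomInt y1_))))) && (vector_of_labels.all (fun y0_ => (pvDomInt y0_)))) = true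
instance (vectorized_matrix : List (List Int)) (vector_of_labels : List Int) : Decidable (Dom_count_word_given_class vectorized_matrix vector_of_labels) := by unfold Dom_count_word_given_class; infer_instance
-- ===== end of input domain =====

-- B replaces A's two index-filtered row lists + zip(*) transposition + filtered summation loops
-- by a single pass over zip(matrix, labels) with lazily-initialized running column-sum vectors (alternative decomposition, same cost).


-- ===== PORT A =====
-- zip(*rows) with tuples rendered as lists: exact, since each produced index j is < every row's length
-- (and zip(*[]) = []).
def pyZipStar (rows : List (List Int)) : List (List Int) :=
  match rows with
  | [] => []
  | r :: rs =>
    let k := rs.foldl (fun m l => min m l.length) r.length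
    (List.range k).map (fun j => (r :: rs).map (fun row => row.getD j 0))

def count_word_given_class (vectorized_matrix : List (List Int)) (vector_of_labels : List Int) : List Int × List Int × Int × Int :=
  -- vectorized_matrix[i] raises IndexError when i ≥ len(vectorized_matrix); Pre_ excludes that, getD is exact inside Pre_
  let data_with_positive_label := ((List.range vector_of_labels.length).filter (fun i => decide (vector_of_labels.getD i 0 = 1))).map (fun i => vectorized_matrix.getD i [])
  let data_with_negative_label := ((List.range vector_of_labels.length).filter (fun i => decide (vector_of_labels.getD i 0 = 0))).map (fun i => vectorized_matrix.getD i [])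
  let number_pos := (pyZipStar data_with_positive_label).map (fun x => x.sum)
  let number_neg := (pyZipStar data_with_negative_label).map (fun x => x.sum)
  let m := number_pos.foldl (fun m i => if i ≠ 0 then m + i else m) 0
  let n := number_neg.foldl (fun n i => if i ≠ 0 then n + i else n) 0
  (number_pos, number_neg, m, n)

-- ===== PORT B =====
-- lazy accumulator: first row of a group starts the vector, later rows are added element-wise (zip to shortest)
def optAdd (p : Option (List Int)) (row : List Int) : Option (List Int) :=
  some (match p with
        | none => row
        | some v => List.zipWith (· + ·) v row)

def count_word_given_class_alt (vectorized_matrix : List (List Int)) (vector_of_labels : List Int) : List Int × List Int × Int × Int :=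
  let pn := (vectorized_matrix.zip vector_of_labels).foldl
    (fun (pn : Option (List Int) × Option (List Int)) rl =>
      if rl.2 = 1 then (optAdd pn.1 rl.1, pn.2)
      else if rl.2 = 0 then (pn.1, optAdd pn.2 rl.1)
      else pn) (none, none)
  let pos := pn.1.getD []
  let neg := pn.2.getD []
  (pos, neg, pos.sum, neg.sum)

-- ===== PRECONDITION & SPEC =====
-- Pre_ excludes exactly the inputs where A raises IndexError: a label position beyond the matrix
-- whose label is 0 or 1 (only those positions index the matrix, since the comprehension tests the label first).
def Pre_count_word_given_class (vectorized_matrix : List (List Int)) (vector_of_labels : List Int) : Prop :=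
  ∀ i, i < vector_of_labels.length → (vector_of_labels.getD i 0 = 0 ∨ vector_of_labels.getD i 0 = 1) → i < vectorized_matrix.length
instance (vectorized_matrix : List (List Int)) (vector_of_labels : List Int) : Decidable (Pre_count_word_given_class vectorized_matrix vector_of_labels) := by unfold Pre_count_word_given_class; infer_instance
def pvWitness_count_word_given_class : List (List Int) × List Int := ([[1, 2], [3, 4], [5, 6]], [1, 0, 1])

def Spec_count_word_given_class (vectorized_matrix : List (List Int)) (vector_of_labels : List Int) (out : List Int × List Int × Int × Int) : Prop := out = count_word_given_class_alt vectorized_matrix vector_of_labels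
instance (vectorized_matrix : List (List Int)) (vector_of_labels : List Int) (out : List Int × List Int × Int × Int) : Decidable (Spec_count_word_given_class vectorized_matrix vector_of_labels out) := by unfold Spec_count_word_given_class; infer_instance

-- ===== CLAIM (what is proved, stated in full; the proofs are below) =====
def Claim_equal_count_word_given_class : Prop := ∀ (vectorized_matrix : List (List Int)) (vector_of_labels : List Int), Dom_count_word_given_class vectorized_matrix vector_of_labels → Pre_count_word_given_class vectorized_matrix vector_of_labels → Spec_count_word_given_class vectorized_matrix vector_of_labels (count_word_given_class vectorized_matrix vector_of_labels)

-- ===== LEMMAS AND PROOFS =====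

-- B's paired fold splits into two independent folds over the label-1 and label-0 rows.
theorem fold_split (l : List (List Int × Int)) (p n : Option (List Int)) :
    l.foldl (fun (pn : Option (List Int) × Option (List Int)) rl =>
      if rl.2 = 1 then (optAdd pn.1 rl.1, pn.2)
      else if rl.2 = 0 then (pn.1, optAdd pn.2 rl.1)
      else pn) (p, n)
    = ((l.filterMap (fun x => if x.2 = 1 then some x.1 else none)).foldl optAdd p,
       (l.filterMap (fun x => if x.2 = 0 then some x.1 else none)).foldl optAdd n) := by
  induction l generalizing p n with
  | nil => rfl
  | cons rl t ih =>
    by_cases h1 : rl.2 = 1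
    · simp [List.foldl_cons, h1, ih]
    · by_cases h0 : rl.2 = 0 <;> simp [List.foldl_cons, h1, h0, ih]

-- A's index-based selection of rows with label c ∈ {0,1} equals the filterMap over zip(matrix, labels).
theorem sel_eq (c : Int) (hc01 : c = 0 ∨ c = 1) : ∀ (labs : List Int) (mat : List (List Int)),
    (∀ i, i < labs.length → (labs.getD i 0 = 0 ∨ labs.getD i 0 = 1) → i < mat.length) →
    ((List.range labs.length).filter (fun i => decide (labs.getD i 0 = c))).map (fun i => mat.getD i [])
    = (mat.zip labs).filterMap (fun x => if x.2 = c then some x.1 else none) := by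
  intro labs
  induction labs with
  | nil => intro mat _; simp
  | cons l ls ih =>
    intro mat h
    match mat with
    | [] =>
      have hnil : ∀ a ∈ List.range (l :: ls).length, ¬ ((fun i => decide ((l :: ls).getD i 0 = c)) a = true) := by
        intro a ha
        rw [List.mem_range] at ha
        simp only [decide_eq_true_eq]
        intro hac
        have h01 : (l :: ls).getD a 0 = 0 ∨ (l :: ls).getD a 0 = 1 := by
          rcases hc01 with h' | h'
          · exact Or.inl (hac.trans h')
          · exact Or.inr (hac.trans h')
        exact absurd (h a ha h01) (Nat.not_lt_zero a)
      rw [List.filter_eq_nil_iff.mpr hnil]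
      simp
    | m :: ms =>
      simp only [List.length_cons, List.range_succ_eq_map, List.filter_cons, List.filter_map]
      have hms : ∀ i, i < ls.length → (ls.getD i 0 = 0 ∨ ls.getD i 0 = 1) → i < ms.length := by
        intro i hi hv
        have := h (i + 1) (by simp; omega) (by simpa using hv)
        simpa using this
      by_cases hc : l = c
      · simp only [List.zip_cons_cons, List.filterMap_cons, if_pos hc]
        simp [hc, List.map_map, Function.comp_def]
        simpa [List.getD_eq_getElem?_getD] using ih ms hms
      · simp only [List.zip_cons_cons, List.filterMap_cons, if_neg hc]
        simp [hc, List.map_map, Function.comp_def]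
        simpa [List.getD_eq_getElem?_getD] using ih ms hms

theorem foldl_min_le : ∀ (t : List (List Int)) (a : Nat), t.foldl (fun m l => min m l.length) a ≤ a := by
  intro t
  induction t with
  | nil => intro a; simp
  | cons u t' ih => intro a; exact le_trans (ih (min a u.length)) (min_le_left _ _)

-- running elementwise accumulation = column sums of the zip(*)-transposition
theorem foldl_zipWith_eq_colsums : ∀ (rs : List (List Int)) (r : List Int),
    rs.foldl (fun v row => List.zipWith (· + ·) v row) r
    = (List.range (rs.foldl (fun m l => min m l.length) r.length)).map
        (fun j => r.getD j 0 + (rs.map (fun row => row.getD j 0)).sum) := by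
  intro rs
  induction rs with
  | nil =>
    intro r
    simp only [List.foldl_nil, List.map_nil, List.sum_nil, add_zero]
    refine List.ext_getElem (by simp) ?_
    intro i h1 h2
    simp [List.getElem?_eq_getElem h1]
  | cons s t ih =>
    intro r
    have hk : ∀ j ∈ List.range (t.foldl (fun m l => min m l.length) (List.zipWith (· + ·) r s).length),
        j < r.length ∧ j < s.length := by
      intro j hj
      rw [List.mem_range] at hj
      have hle := foldl_min_le t (List.zipWith (· + ·) r s).length
      simp only [List.length_zipWith] at hle hj
      omega
    simp only [List.foldl_cons, ih (List.zipWith (· + ·) r s), List.length_zipWith]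
    apply List.map_congr_left
    intro j hj
    obtain ⟨hr, hs⟩ := hk j (by simpa [List.length_zipWith] using hj)
    have : (List.zipWith (· + ·) r s).getD j 0 = r.getD j 0 + s.getD j 0 := by
      rw [List.getD_eq_getElem _ _ (by simp [List.length_zipWith]; omega),
          List.getD_eq_getElem _ _ hr, List.getD_eq_getElem _ _ hs]
      simp
    rw [this]
    simp [add_assoc]

-- B's accumulated group vector equals A's per-column sums of zip(*rows).
theorem acc_eq_zipstar (rows : List (List Int)) :
    (rows.foldl optAdd none).getD [] = (pyZipStar rows).map (fun x => x.sum) := by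
  match rows with
  | [] => rfl
  | r :: rs =>
    have h1 : ∀ (t : List (List Int)) (v : List Int),
        t.foldl optAdd (some v) = some (t.foldl (fun v row => List.zipWith (· + ·) v row) v) := by
      intro t
      induction t with
      | nil => intro v; rfl
      | cons u t' ih => intro v; simp [List.foldl_cons, optAdd, ih]
    simp only [List.foldl_cons]
    show ((rs.foldl optAdd (some r)).getD []) = _
    rw [h1, Option.getD_some, foldl_zipWith_eq_colsums]
    simp [pyZipStar, List.map_map, Function.comp_def]

-- A's skip-zero summation loop is just the sum.
theorem foldl_ne_zero_sum : ∀ (l : List Int) (a : Int),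
    l.foldl (fun m i => if i ≠ 0 then m + i else m) a = a + l.sum := by
  intro l
  induction l with
  | nil => intro a; simp
  | cons x t ih =>
    intro a
    have hstep : (if x ≠ 0 then a + x else a) = a + x := by
      by_cases hx : x = 0 <;> simp [hx]
    simp only [List.foldl_cons]
    rw [hstep, ih, List.sum_cons]
    ring

-- ===== VERDICT (by name: the statement is the Claim_ definition above) =====
theorem count_word_given_class_spec : Claim_equal_count_word_given_class := by
  unfold Claim_equal_count_word_given_class
  intro mat labs _ hpre
  unfold Pre_count_word_given_class at hpre
  unfold Spec_count_word_given_class count_word_given_class count_word_given_class_alt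
  simp only [fold_split, sel_eq 1 (Or.inr rfl) labs mat hpre, sel_eq 0 (Or.inl rfl) labs mat hpre,
    ← acc_eq_zipstar, foldl_ne_zero_sum, zero_add]
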